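-- pv_equiv track=rewrite | github.com/wanghaoqing/EnsemblePDB | EnsemblePDB/refine/check_chains.py | make_positions_dict
-- ===== SOURCE A (Python) =====
-- def make_positions_dict(row):
--     '''
--     Apply on rows of ensemble csv to create a dictionary where key is chain
--     name and value is the positions where the chain aligns to the reference
--     chain/sequence.
--     '''
--     positions = {}
--     for index, seq in enumerate(row['aligned_seqs']):
--         list_of_positions = []
--         chain = row['order_of_chains'][index]
--         start = end = -1
--         for i, char in enumerate(seq):
--             if char.isalpha():
--                 if start == -1:
--                     start = i
--             else:
--                 if start != -1:
--                     end = i - 1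
--                     list_of_positions.append((start, end))
--                     start = end = -1
--         if start != -1:
--             list_of_positions.append((start, len(seq)-1))
--         positions[chain] = list_of_positions
--     return positions
-- ===== SOURCE B (Python) =====
-- from itertools import groupby
--
--
-- def make_positions_dict(row):
--     '''Chain -> list of (start, end) index ranges of the alphabetic runs
--     of its aligned sequence.'''
--     positions = {}
--     for index, seq in enumerate(row['aligned_seqs']):
--         runs = []
--         for key, group in groupby(enumerate(seq), key=lambda ic: ic[1].isalpha()):
--             if key:
--                 g = list(group)
--                 runs.append((g[0][0], g[-1][0]))
--         positions[row['order_of_chains'][index]] = runs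
--     return positions
-- ===== Notes on version B (the rewrite author's own statement) =====
-- stated objective: idiomatic
-- what changed: The inner -1-sentinel state machine with a trailing flush is replaced by itertools.groupby(enumerate(seq)) keyed on isalpha: each True group yields (first index, last index) directly.
import Mathlib
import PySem

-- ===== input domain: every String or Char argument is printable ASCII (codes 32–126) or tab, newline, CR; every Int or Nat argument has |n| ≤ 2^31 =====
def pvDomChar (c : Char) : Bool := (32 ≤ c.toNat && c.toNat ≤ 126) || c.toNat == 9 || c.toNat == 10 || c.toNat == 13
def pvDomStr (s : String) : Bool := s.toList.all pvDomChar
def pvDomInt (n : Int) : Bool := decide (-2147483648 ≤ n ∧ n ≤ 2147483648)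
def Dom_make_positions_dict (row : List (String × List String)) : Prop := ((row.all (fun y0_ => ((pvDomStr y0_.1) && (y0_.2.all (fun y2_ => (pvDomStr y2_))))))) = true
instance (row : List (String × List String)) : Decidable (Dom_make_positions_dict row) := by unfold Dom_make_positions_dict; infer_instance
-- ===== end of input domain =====

-- B replaces A's -1-sentinel inner state machine (with its trailing flush) by grouping the
-- enumerated characters by isalpha (itertools.groupby) and emitting (first, last) index of
-- each alphabetic group.

-- ===== PORT A =====
-- A's inner for-loop: state (list_of_positions, start, end); the trailing
-- 'if start != -1: append (start, len(seq)-1)' is the [] case (n = len(seq))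
def pvLoopA (n : Int) : List (Int × Char) → (List (Int × Int) × Int × Int) → List (Int × Int)
  | [], st => if st.2.1 ≠ -1 then st.1 ++ [(st.2.1, n - 1)] else st.1
  | ic :: rest, st =>
      if PySem.Chars.isalpha ic.2 then
        (if st.2.1 = -1 then pvLoopA n rest (st.1, ic.1, st.2.2) else pvLoopA n rest st)
      else
        (if st.2.1 ≠ -1 then pvLoopA n rest (st.1 ++ [(st.2.1, ic.1 - 1)], -1, -1) else pvLoopA n rest st)

def pvInnerA (seq : String) : List (Int × Int) :=
  pvLoopA (seq.toList.length : Int) (PySem.List.enumerate seq.toList 0) ([], -1, -1)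

def make_positions_dict (row : List (String × List String)) : List (String × List (Int × Int)) :=
  let aligned := ((PySem.Dict.mk row).get? "aligned_seqs").getD []
  let order := ((PySem.Dict.mk row).get? "order_of_chains").getD []
  ((PySem.List.enumerate aligned 0).foldl
    (fun pos is =>
      pos.insert ((PySem.List.pyGet? order is.1).getD "") (pvInnerA is.2))
    PySem.Dict.empty).items

-- ===== PORT B =====
-- hand port of itertools.groupby(·, key = isalpha ∘ snd) over an enumerated sequence:
-- accumulator = current key and current group (reversed)
def pvGrpGo (k : Bool) (g : List (Int × Char)) : List (Int × Char) → List (Bool × List (Int × Char))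
  | [] => [(k, g.reverse)]
  | p :: rest =>
    if PySem.Chars.isalpha p.2 = k then pvGrpGo k (p :: g) rest
    else (k, g.reverse) :: pvGrpGo (PySem.Chars.isalpha p.2) [p] rest

def pvGrp : List (Int × Char) → List (Bool × List (Int × Char))
  | [] => []
  | p :: rest => pvGrpGo (PySem.Chars.isalpha p.2) [p] rest

-- B's inner loop: keep the alphabetic groups, take first and last index of each
def pvAlphaRuns (seq : String) : List (Int × Int) :=
  (pvGrp (PySem.List.enumerate seq.toList 0)).filterMap
    (fun kg => if kg.1 then some (kg.2.headI.1, kg.2.getLastI.1) else none)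

def make_positions_dict_alt (row : List (String × List String)) : List (String × List (Int × Int)) :=
  let aligned := ((PySem.Dict.mk row).get? "aligned_seqs").getD []
  let order := ((PySem.Dict.mk row).get? "order_of_chains").getD []
  ((PySem.List.enumerate aligned 0).foldl
    (fun pos is =>
      pos.insert ((PySem.List.pyGet? order is.1).getD "") (pvAlphaRuns is.2))
    PySem.Dict.empty).items

-- ===== PRECONDITION & SPEC =====
-- Pre_: exactly the inputs on which Python A returns — "aligned_seqs" present (first match;
-- else KeyError) and, unless it is empty (then the loop never looks), "order_of_chains"
-- present and at least as long (else KeyError / IndexError).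
def Pre_make_positions_dict (row : List (String × List String)) : Prop :=
  ((PySem.Dict.mk row).get? "aligned_seqs").isSome = true ∧
  ((((PySem.Dict.mk row).get? "aligned_seqs").getD []) = [] ∨
    (((PySem.Dict.mk row).get? "order_of_chains").isSome = true ∧
     (((PySem.Dict.mk row).get? "aligned_seqs").getD []).length ≤
       (((PySem.Dict.mk row).get? "order_of_chains").getD []).length))

instance (row : List (String × List String)) : Decidable (Pre_make_positions_dict row) := by
  unfold Pre_make_positions_dict; infer_instance

def pvWitness_make_positions_dict : (List (String × List String)) :=
  [("aligned_seqs", ["ab-c", "-xy"]), ("order_of_chains", ["A", "B"])]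

def Spec_make_positions_dict (row : List (String × List String)) (out : List (String × List (Int × Int))) : Prop := out = make_positions_dict_alt row
instance (row : List (String × List String)) (out : List (String × List (Int × Int))) : Decidable (Spec_make_positions_dict row out) := by unfold Spec_make_positions_dict; infer_instance

-- ===== CLAIM (what is proved, stated in full; the proofs are below) =====
def Claim_equal_make_positions_dict : Prop := ∀ (row : List (String × List String)), Dom_make_positions_dict row → Pre_make_positions_dict row → Spec_make_positions_dict row (make_positions_dict row)

-- ===== LEMMAS AND PROOFS =====

-- canonical description of the alphabetic runs: st = some s while inside a run started at s
def pvRunsC (st : Option Int) (i : Int) : List Char → List (Int × Int)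
  | [] => match st with | some s => [(s, i - 1)] | none => []
  | c :: rest =>
    if PySem.Chars.isalpha c then
      match st with
      | some s => pvRunsC (some s) (i + 1) rest
      | none => pvRunsC (some i) (i + 1) rest
    else
      match st with
      | some s => (s, i - 1) :: pvRunsC none (i + 1) rest
      | none => pvRunsC none (i + 1) rest

lemma pvA1 (cs : List Char) : ∀ (n i s e : Int) (lst : List (Int × Int)), 0 ≤ i →
    n = i + cs.length →
    pvLoopA n (PySem.List.enumerate cs i) (lst, s, e)
      = lst ++ pvRunsC (if s = -1 then none else some s) i cs := by
  induction cs with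
  | nil =>
    intro n i s e lst hi hn
    simp only [List.length_nil, Int.natCast_zero, add_zero] at hn
    subst hn
    simp only [PySem.List.enumerate_nil, pvLoopA, pvRunsC, ne_eq]
    by_cases hs : s = -1 <;> simp [hs]
  | cons c rest ih =>
    intro n i s e lst hi hn
    simp only [List.length_cons] at hn
    push_cast at hn
    rw [PySem.List.enumerate_cons]
    by_cases hc : PySem.Chars.isalpha c
    · by_cases hs : s = -1
      · simp only [pvLoopA, pvRunsC, hc, hs, reduceIte, if_true]
        rw [ih n (i + 1) i e lst (by omega) (by omega)]
        simp [show ¬ (i = -1) by omega]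
      · simp only [pvLoopA, pvRunsC, hc, hs, if_true, if_false]
        rw [ih n (i + 1) s e lst (by omega) (by omega)]
        simp [hs]
    · by_cases hs : s = -1
      · simp only [pvLoopA, pvRunsC, hc, hs, Bool.false_eq_true, reduceIte, ne_eq,
          not_true_eq_false, if_false]
        rw [ih n (i + 1) (-1) e lst (by omega) (by omega)]
        simp
      · simp only [pvLoopA, pvRunsC, hc, hs, Bool.false_eq_true, reduceIte, ne_eq,
          not_false_eq_true, if_true]
        rw [ih n (i + 1) (-1) (-1) (lst ++ [(s, i - 1)]) (by omega) (by omega)]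
        simp

def pvEmit (gs : List (Bool × List (Int × Char))) : List (Int × Int) :=
  gs.filterMap (fun kg => if kg.1 then some (kg.2.headI.1, kg.2.getLastI.1) else none)

lemma pvRevHead {g : List (Int × Char)} (h : g ≠ []) : g.reverse.headI = g.getLastI := by
  cases hg : g.reverse with
  | nil => simp at hg; exact absurd hg h
  | cons a t =>
    have : g = (a :: t).reverse := by rw [← hg, List.reverse_reverse]
    subst this
    simp [List.getLastI_eq_getLast?_getD, List.getLast?_reverse]

lemma pvRevLast {g : List (Int × Char)} (h : g ≠ []) : g.reverse.getLastI = g.headI := by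
  have := pvRevHead (g := g.reverse) (by simpa using h)
  simpa using this.symm

lemma pvLastCons {a : Int × Char} {g : List (Int × Char)} (h : g ≠ []) :
    (a :: g).getLastI = g.getLastI := by
  obtain ⟨x, hx⟩ := Option.isSome_iff_exists.mp (List.getLast?_isSome.mpr h)
  simp [List.getLastI_eq_getLast?_getD, List.getLast?_cons, hx]

lemma pvB1 (cs : List Char) : ∀ (i : Int),
    (∀ (g : List (Int × Char)) (s : Int), g ≠ [] → g.headI.1 = i - 1 → g.getLastI.1 = s →
      pvEmit (pvGrpGo true g (PySem.List.enumerate cs i)) = pvRunsC (some s) i cs) ∧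
    (∀ (g : List (Int × Char)),
      pvEmit (pvGrpGo false g (PySem.List.enumerate cs i)) = pvRunsC none i cs) := by
  induction cs with
  | nil =>
    intro i
    constructor
    · intro g s hg hh hl
      simp only [PySem.List.enumerate_nil, pvGrpGo, pvEmit, List.filterMap, reduceIte, pvRunsC]
      rw [pvRevHead hg, pvRevLast hg, hh, hl]
    · intro g
      simp [PySem.List.enumerate_nil, pvGrpGo, pvEmit, pvRunsC]
  | cons c rest ih =>
    intro i
    constructor
    · intro g s hg hh hl
      rw [PySem.List.enumerate_cons]
      by_cases hc : PySem.Chars.isalpha c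
      · simp only [pvGrpGo, pvRunsC, hc, reduceIte]
        exact (ih (i + 1)).1 ((i, c) :: g) s (by simp)
          (by simp only [List.headI]; omega)
          (by rw [pvLastCons hg]; exact hl)
      · simp only [pvGrpGo, pvRunsC, hc, Bool.false_eq_true, reduceIte]
        simp only [pvEmit, List.filterMap_cons, reduceIte]
        rw [pvRevHead hg, pvRevLast hg, hh, hl]
        have h2 := (ih (i + 1)).2 [(i, c)]
        simp only [pvEmit] at h2
        rw [h2]
    · intro g
      rw [PySem.List.enumerate_cons]
      by_cases hc : PySem.Chars.isalpha c
      · simp only [pvGrpGo, pvRunsC, hc, Bool.true_eq_false, reduceIte]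
        simp only [pvEmit, List.filterMap_cons, Bool.false_eq_true, reduceIte]
        have h1 := (ih (i + 1)).1 [(i, c)] i (by simp)
          (by simp only [List.headI]; omega) (by simp [List.getLastI])
        simp only [pvEmit] at h1
        rw [h1]
      · simp only [pvGrpGo, pvRunsC, hc, Bool.false_eq_true, reduceIte]
        exact (ih (i + 1)).2 ((i, c) :: g)

lemma pvInnerA_eq_runsC (seq : String) : pvInnerA seq = pvRunsC none 0 seq.toList := by
  unfold pvInnerA
  rw [pvA1 seq.toList (seq.toList.length : Int) 0 (-1) (-1) [] le_rfl (by omega)]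
  simp

lemma pvAlphaRuns_eq_runsC (seq : String) : pvAlphaRuns seq = pvRunsC none 0 seq.toList := by
  unfold pvAlphaRuns
  cases hcs : seq.toList with
  | nil => simp [pvGrp, PySem.List.enumerate_nil, pvRunsC]
  | cons c rest =>
    rw [PySem.List.enumerate_cons, pvGrp]
    by_cases hc : PySem.Chars.isalpha c
    · have h1 := (pvB1 rest (0 + 1)).1 [((0 : Int), c)] 0 (by simp)
        (by simp only [List.headI]; omega) (by simp [List.getLastI])
      simp only [pvEmit] at h1
      simp only [hc, h1, pvRunsC, reduceIte]
    · have h2 := (pvB1 rest (0 + 1)).2 [((0 : Int), c)]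
      simp only [pvEmit] at h2
      simp only [hc, Bool.false_eq_true, h2, pvRunsC, reduceIte]

lemma pvInner_eq (seq : String) : pvInnerA seq = pvAlphaRuns seq := by
  rw [pvInnerA_eq_runsC, pvAlphaRuns_eq_runsC]

-- ===== VERDICT (by name: the statement is the Claim_ definition above) =====
theorem make_positions_dict_spec : Claim_equal_make_positions_dict := by
  intro row _ _
  unfold Spec_make_positions_dict make_positions_dict make_positions_dict_alt
  rw [funext pvInner_eq]
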